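-- pv_equiv track=rewrite | github.com/basu-10/NoteStack | NoteStack/ui/main_window.py | _folder_depth_map
-- ===== SOURCE A (Python) =====
-- def _folder_depth_map(folders: list[dict]) -> dict[int, int]:
--     parent_by_id = {f["id"]: f.get("parent_id") for f in folders}
--     cache: dict[int, int] = {}
--
--     def _depth(folder_id: int, path: set[int]) -> int:
--         if folder_id in cache:
--             return cache[folder_id]
--         if folder_id in path:
--             return 1
--         path.add(folder_id)
--         parent_id = parent_by_id.get(folder_id)
--         if parent_id is None or parent_id not in parent_by_id:
--             value = 1
--         else:
--             value = 1 + _depth(parent_id, path)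
--         path.remove(folder_id)
--         cache[folder_id] = value
--         return value
--
--     for folder in folders:
--         _depth(folder["id"], set())
--     return cache
-- ===== SOURCE B (Python) =====
-- def _folder_depth_map(folders: list[dict]) -> dict[int, int]:
--     parent_by_id = {f["id"]: f.get("parent_id") for f in folders}
--     cache: dict[int, int] = {}
--
--     for folder in folders:
--         fid = folder["id"]
--         if fid in cache:
--             continue
--         # walk up the parent chain iteratively, collecting the visited nodes
--         chain = []
--         seen = set()
--         node = fid
--         while True:
--             chain.append(node)
--             seen.add(node)
--             parent_id = parent_by_id.get(node)
--             if parent_id is None or parent_id not in parent_by_id: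
--                 base = 1
--                 break
--             if parent_id in cache:
--                 base = 1 + cache[parent_id]
--                 break
--             if parent_id in seen:  # cycle closes here
--                 base = 2
--                 break
--             node = parent_id
--         # assign depths outward, deepest ancestor first
--         for n in reversed(chain):
--             cache[n] = base
--             base += 1
--     return cache
-- ===== Notes on version B (the rewrite author's own statement) =====
-- stated objective: alternative
-- what changed: The recursive memoized depth helper is replaced by an iterative walk that collects each uncached parent chain into a list and then assigns cached depths back along the reversed chain, removing recursion entirely.
import Mathlib
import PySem

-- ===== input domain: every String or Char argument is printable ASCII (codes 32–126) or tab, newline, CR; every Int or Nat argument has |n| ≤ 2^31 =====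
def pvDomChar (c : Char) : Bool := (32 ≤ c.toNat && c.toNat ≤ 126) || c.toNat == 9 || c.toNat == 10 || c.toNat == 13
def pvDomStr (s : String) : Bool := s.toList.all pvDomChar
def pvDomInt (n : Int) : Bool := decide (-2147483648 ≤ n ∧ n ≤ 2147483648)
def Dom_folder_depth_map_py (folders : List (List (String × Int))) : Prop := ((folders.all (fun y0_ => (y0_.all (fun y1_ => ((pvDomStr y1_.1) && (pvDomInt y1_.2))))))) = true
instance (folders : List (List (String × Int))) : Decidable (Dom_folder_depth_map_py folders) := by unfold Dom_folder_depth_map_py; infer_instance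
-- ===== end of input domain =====

-- B replaces A's recursive memoized depth helper by an iterative parent-chain walk
-- plus a reverse assignment pass (objective: alternative decomposition, same cost).

-- shared helper: parent_by_id = {f["id"]: f.get("parent_id") for f in folders}
-- (both Python versions build this identical comprehension; a folder dict without
--  "id" raises KeyError in Python — outside Pre_ — and is skipped by the ports)
def pvParentStep (d : PySem.Dict Int (Option Int)) (f : List (String × Int)) :
    PySem.Dict Int (Option Int) :=
  match (PySem.Dict.mk f).get? "id" with
  | none => d
  | some i => d.insert i ((PySem.Dict.mk f).get? "parent_id")

def pvParentMap (folders : List (List (String × Int))) : PySem.Dict Int (Option Int) :=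
  folders.foldl pvParentStep PySem.Dict.empty

-- ===== PORT A =====
-- the recursive helper _depth(folder_id, path); fuel pm.size+2 bounds its call depth
-- (each recursing call adds a distinct parent_by_id key to path, plus one terminal
-- call); none = fuel exhausted, proved unreachable from the top level
def pvDepthA (pm : PySem.Dict Int (Option Int)) :
    Nat → Int → PySem.Set Int → PySem.Dict Int Int → Option (Int × PySem.Dict Int Int)
  | 0, _, _, _ => none
  | fuel+1, fid, path, cache =>
    match cache.get? fid with
    | some v => some (v, cache)
    | none =>
      if path.contains fid then some (1, cache)
      else
        match (pm.get? fid).join with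
        | none => some (1, cache.insert fid 1)
        | some p =>
          if pm.contains p = false then some (1, cache.insert fid 1)
          else
            match pvDepthA pm fuel p (path.add fid) cache with
            | none => none
            | some (d, c) => some (1 + d, c.insert fid (1 + d))

-- the body of A's 'for folder in folders: _depth(folder["id"], set())'
def pvStepA (pm : PySem.Dict Int (Option Int)) (cache : PySem.Dict Int Int)
    (f : List (String × Int)) : PySem.Dict Int Int :=
  match (PySem.Dict.mk f).get? "id" with
  | none => cache   -- Python raises KeyError here (outside Pre_)
  | some fid =>
    match pvDepthA pm (pm.size + 2) fid PySem.Set.empty cache with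
    | none => cache
    | some (_, c) => c

def folder_depth_map_py (folders : List (List (String × Int))) : List (Int × Int) :=
  let pm := pvParentMap folders
  (folders.foldl (pvStepA pm) PySem.Dict.empty).items

-- ===== PORT B =====
-- the while-loop: collect the chain of visited ids and the terminal base value;
-- fuel pm.size+1 bounds the iterations (each visits a fresh parent_by_id key);
-- none = fuel exhausted, proved unreachable
def pvWalkB (pm : PySem.Dict Int (Option Int)) (cache : PySem.Dict Int Int) :
    Nat → Int → PySem.Set Int → List Int → Option (List Int × Int)
  | 0, _, _, _ => none
  | fuel+1, node, seen, chain =>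
    let chain' := chain ++ [node]
    let seen' := seen.add node
    match (pm.get? node).join with
    | none => some (chain', 1)
    | some p =>
      if pm.contains p = false then some (chain', 1)
      else
        match cache.get? p with
        | some v => some (chain', 1 + v)
        | none =>
          if seen'.contains p then some (chain', 2)
          else pvWalkB pm cache fuel p seen' chain'

-- the reverse assignment pass: for n in reversed(chain): cache[n] = base; base += 1
def pvAssignB (cache : PySem.Dict Int Int) (chain : List Int) (base : Int) :
    PySem.Dict Int Int :=
  (chain.reverse.foldl (fun (cb : PySem.Dict Int Int × Int) n => (cb.1.insert n cb.2, cb.2 + 1))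
    (cache, base)).1

-- the body of B's outer 'for folder in folders: …'
def pvStepB (pm : PySem.Dict Int (Option Int)) (cache : PySem.Dict Int Int)
    (f : List (String × Int)) : PySem.Dict Int Int :=
  match (PySem.Dict.mk f).get? "id" with
  | none => cache   -- Python raises KeyError here (outside Pre_)
  | some fid =>
    if (cache.get? fid).isSome then cache
    else
      match pvWalkB pm cache (pm.size + 1) fid PySem.Set.empty [] with
      | none => cache
      | some (chain, base) => pvAssignB cache chain base

def folder_depth_map_py_alt (folders : List (List (String × Int))) : List (Int × Int) :=
  let pm := pvParentMap folders
  (folders.foldl (pvStepB pm) PySem.Dict.empty).items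

-- ===== PRECONDITION & SPEC =====
-- Pre_: every folder dict has an "id" key; on a folder without one BOTH Pythons raise KeyError.
def Pre_folder_depth_map_py (folders : List (List (String × Int))) : Prop :=
  ∀ f ∈ folders, ((PySem.Dict.mk f).get? "id").isSome
instance (folders : List (List (String × Int))) : Decidable (Pre_folder_depth_map_py folders) := by unfold Pre_folder_depth_map_py; infer_instance

def pvWitness_folder_depth_map_py : (List (List (String × Int))) :=
  [[("id", 1), ("parent_id", 2)], [("id", 2)], [("id", 3), ("parent_id", 3)]]

def Spec_folder_depth_map_py (folders : List (List (String × Int))) (out : List (Int × Int)) : Prop := out = folder_depth_map_py_alt folders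
instance (folders : List (List (String × Int))) (out : List (Int × Int)) : Decidable (Spec_folder_depth_map_py folders out) := by unfold Spec_folder_depth_map_py; infer_instance

-- ===== CLAIM (what is proved, stated in full; the proofs are below) =====
def Claim_equal_folder_depth_map_py : Prop := ∀ (folders : List (List (String × Int))), Dom_folder_depth_map_py folders → Pre_folder_depth_map_py folders → Spec_folder_depth_map_py folders (folder_depth_map_py folders)

-- ===== LEMMAS AND PROOFS =====

-- one-step unfolding equations
lemma pvDepthA_succ (pm : PySem.Dict Int (Option Int)) (fuel : Nat) (fid : Int)
    (path : PySem.Set Int) (cache : PySem.Dict Int Int) :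
    pvDepthA pm (fuel+1) fid path cache =
      (match cache.get? fid with
        | some v => some (v, cache)
        | none =>
          if path.contains fid then some (1, cache)
          else
            match (pm.get? fid).join with
            | none => some (1, cache.insert fid 1)
            | some p =>
              if pm.contains p = false then some (1, cache.insert fid 1)
              else
                match pvDepthA pm fuel p (path.add fid) cache with
                | none => none
                | some (d, c) => some (1 + d, c.insert fid (1 + d))) := rfl

lemma pvWalkB_succ (pm : PySem.Dict Int (Option Int)) (cache : PySem.Dict Int Int)
    (fuel : Nat) (node : Int) (seen : PySem.Set Int) (chain : List Int) :
    pvWalkB pm cache (fuel+1) node seen chain =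
      (match (pm.get? node).join with
        | none => some (chain ++ [node], 1)
        | some p =>
          if pm.contains p = false then some (chain ++ [node], 1)
          else
            match cache.get? p with
            | some v => some (chain ++ [node], 1 + v)
            | none =>
              if (seen.add node).contains p then some (chain ++ [node], 2)
              else pvWalkB pm cache fuel p (seen.add node) (chain ++ [node])) := rfl

-- Set.contains on Int agrees with membership
lemma pvSet_contains_iff (s : PySem.Set Int) (x : Int) : s.contains x = true ↔ x ∈ s := by
  simp [PySem.Set.contains]

-- the assignment fold's running counter
lemma pvAssign_snd (l : List Int) (c : PySem.Dict Int Int) (b : Int) :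
    (l.foldl (fun (cb : PySem.Dict Int Int × Int) n => (cb.1.insert n cb.2, cb.2 + 1)) (c, b)).2
      = b + l.length := by
  induction l generalizing c b with
  | nil => simp
  | cons x xs ih => simp [List.foldl_cons, ih]; ring

lemma pvAssignB_cons (cache : PySem.Dict Int Int) (n : Int) (t : List Int) (b : Int) :
    pvAssignB cache (n :: t) b = (pvAssignB cache t b).insert n (b + t.length) := by
  unfold pvAssignB
  rw [List.reverse_cons, List.foldl_append]
  simp only [List.foldl_cons, List.foldl_nil]
  rw [pvAssign_snd, List.length_reverse]

-- filter-length monotonicity and strict decrease (for the fuel bound)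
lemma pvFilter_le (p q : Int → Bool) (hpq : ∀ x, q x = true → p x = true) (l : List Int) :
    (l.filter q).length ≤ (l.filter p).length := by
  induction l with
  | nil => simp
  | cons x xs ih =>
    cases hqx : q x with
    | true => simp [hqx, hpq x hqx]; omega
    | false => cases hpx : p x <;> simp [hqx, hpx] <;> omega

lemma pvFilter_lt (p q : Int → Bool) (hpq : ∀ x, q x = true → p x = true) (l : List Int)
    (a : Int) (ha : a ∈ l) (hp : p a = true) (hq : q a = false) :
    (l.filter q).length < (l.filter p).length := by
  induction l with
  | nil => simp at ha
  | cons x xs ih =>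
    rcases List.mem_cons.mp ha with rfl | hmem
    · have h1 := pvFilter_le p q hpq xs
      simp [hq, hp]
      omega
    · have h1 := ih hmem
      cases hqx : q x with
      | true => simp [hqx, hpq x hqx]; omega
      | false => cases hpx : p x <;> simp [hqx, hpx] <;> omega

-- every folder's id is a key of the finished parent map
lemma pvParentMap_keys_mono (l : List (List (String × Int))) (d : PySem.Dict Int (Option Int))
    (k : Int) (hk : k ∈ d.keys) : k ∈ (l.foldl pvParentStep d).keys := by
  induction l generalizing d with
  | nil => simpa using hk
  | cons f fs ih =>
    rw [List.foldl_cons]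
    apply ih
    unfold pvParentStep
    cases hg : (PySem.Dict.mk f).get? "id" with
    | none => exact hk
    | some i => exact (PySem.Dict.mem_keys_insert _ _ _ _).mpr (Or.inr hk)

lemma pvParentMap_mem_keys (l : List (List (String × Int))) (d : PySem.Dict Int (Option Int))
    (f : List (String × Int)) (hf : f ∈ l) (fid : Int)
    (hg : (PySem.Dict.mk f).get? "id" = some fid) : fid ∈ (l.foldl pvParentStep d).keys := by
  induction l generalizing d with
  | nil => simp at hf
  | cons g gs ih =>
    rw [List.foldl_cons]
    rcases List.mem_cons.mp hf with rfl | hmem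
    · apply pvParentMap_keys_mono
      unfold pvParentStep
      rw [hg]
      exact (PySem.Dict.mem_keys_insert _ _ _ _).mpr (Or.inl rfl)
    · exact ih _ hmem

-- B's walk cannot run out of fuel: each iteration visits a fresh key of pm
lemma pvWalkB_ne_none (pm : PySem.Dict Int (Option Int)) (cache : PySem.Dict Int Int) :
    ∀ (fuel : Nat) (node : Int) (seen : PySem.Set Int) (chain : List Int),
      node ∈ pm.keys → seen.contains node = false →
      (pm.keys.filter (fun k => !seen.contains k)).length < fuel →
      pvWalkB pm cache fuel node seen chain ≠ none := by
  intro fuel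
  induction fuel with
  | zero => intro node seen chain _ _ h; omega
  | succ m ih =>
    intro node seen chain hmem hns hlt
    rw [pvWalkB_succ]
    cases hj : (pm.get? node).join with
    | none => simp
    | some p =>
      dsimp only
      by_cases hpf : pm.contains p = false
      · simp [hpf]
      · have hp' : pm.contains p = true := by
          cases h : pm.contains p
          · exact absurd h hpf
          · rfl
        rw [hp']
        simp only [Bool.true_eq_false, if_false]
        cases hcp : cache.get? p with
        | some v => simp
        | none =>
          dsimp only
          cases hsp : (seen.add node).contains p with
          | true => simp
          | false =>
            simp only [Bool.false_eq_true, if_false]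
            apply ih
            · exact (PySem.Dict.contains_iff_mem_keys pm p).mp hp'
            · exact hsp
            · have hdec := pvFilter_lt (fun k => !seen.contains k)
                (fun k => !(seen.add node).contains k)
                (by
                  intro x hx
                  simp only [Bool.not_eq_true'] at hx ⊢
                  cases h : seen.contains x
                  · rfl
                  · exfalso
                    have hx' : x ∈ seen.add node :=
                      (PySem.Set.mem_add seen node x).mpr
                        (Or.inl ((pvSet_contains_iff seen x).mp h))
                    rw [← pvSet_contains_iff] at hx'
                    rw [hx'] at hx
                    exact absurd hx (by simp))
                pm.keys node hmem (by simp only [Bool.not_eq_true']; exact hns)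
                (by simp)
              omega

-- the heart: B's walk + reverse assignment computes exactly A's recursion
lemma pvWalk_depth (pm : PySem.Dict Int (Option Int)) (cache : PySem.Dict Int Int) :
    ∀ (fuel : Nat) (node : Int) (seen : PySem.Set Int) (acc ch : List Int) (base : Int),
      cache.get? node = none →
      seen.contains node = false →
      (∀ x : Int, seen.contains x = true → cache.get? x = none) →
      pvWalkB pm cache fuel node seen acc = some (ch, base) →
      ∃ t : List Int, ch = acc ++ t ∧
        pvDepthA pm (fuel+1) node seen cache
          = some (base + t.length - 1, pvAssignB cache t base) := by
  intro fuel
  induction fuel with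
  | zero => intro node seen acc ch base _ _ _ hw; simp [pvWalkB] at hw
  | succ m ih =>
    intro node seen acc ch base hc hns hinv hw
    rw [pvWalkB_succ] at hw
    rw [pvDepthA_succ, hc]
    dsimp only
    rw [hns]
    simp only [Bool.false_eq_true, if_false]
    cases hj : (pm.get? node).join with
    | none =>
      rw [hj] at hw
      dsimp only at hw
      injection hw with hw'
      injection hw' with h1 h2
      subst h1; subst h2
      exact ⟨[node], rfl, by simp [pvAssignB]⟩
    | some p =>
      rw [hj] at hw
      dsimp only at hw ⊢
      by_cases hpf : pm.contains p = false
      · rw [if_pos hpf] at hw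
        rw [if_pos hpf]
        injection hw with hw'
        injection hw' with h1 h2
        subst h1; subst h2
        exact ⟨[node], rfl, by simp [pvAssignB]⟩
      · rw [if_neg hpf] at hw
        rw [if_neg hpf]
        cases hcp : cache.get? p with
        | some v =>
          rw [hcp] at hw
          dsimp only at hw
          injection hw with hw'
          injection hw' with h1 h2
          subst h1; subst h2
          refine ⟨[node], rfl, ?_⟩
          rw [pvDepthA_succ, hcp]
          dsimp only
          simp [pvAssignB]
        | none =>
          rw [hcp] at hw
          dsimp only at hw
          cases hsp : (seen.add node).contains p with
          | true =>
            rw [hsp] at hw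
            simp only [if_true] at hw
            injection hw with hw'
            injection hw' with h1 h2
            subst h1; subst h2
            refine ⟨[node], rfl, ?_⟩
            rw [pvDepthA_succ, hcp]
            dsimp only
            rw [hsp]
            simp [pvAssignB]
          | false =>
            rw [hsp] at hw
            simp only [Bool.false_eq_true, if_false] at hw
            obtain ⟨t', ht', hd⟩ := ih p (seen.add node) (acc ++ [node]) ch base hcp hsp
              (by
                intro x hx
                rcases (PySem.Set.mem_add seen node x).mp
                    ((pvSet_contains_iff _ x).mp hx) with hxs | rfl
                · exact hinv x ((pvSet_contains_iff seen x).mpr hxs)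
                · exact hc)
              hw
            refine ⟨node :: t', by simpa [List.append_assoc] using ht', ?_⟩
            rw [hd]
            dsimp only
            rw [pvAssignB_cons]
            have e1 : (1 : Int) + (base + (t'.length : Int) - 1) = base + (t'.length : Int) := by
              ring
            have e2 : base + ((node :: t').length : Int) - 1 = base + (t'.length : Int) := by
              push_cast [List.length_cons]; ring
            rw [e1, e2]

-- per-folder step equality
lemma pvStep_eq (pm : PySem.Dict Int (Option Int)) (cache : PySem.Dict Int Int)
    (f : List (String × Int))
    (h : ∀ fid : Int, (PySem.Dict.mk f).get? "id" = some fid → fid ∈ pm.keys) :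
    pvStepA pm cache f = pvStepB pm cache f := by
  unfold pvStepA pvStepB
  cases hg : (PySem.Dict.mk f).get? "id" with
  | none => rfl
  | some fid =>
    dsimp only
    cases hc : cache.get? fid with
    | some v =>
      rw [show pm.size + 2 = pm.size + 1 + 1 from rfl, pvDepthA_succ, hc]
      simp
    | none =>
      simp only [Option.isSome_none, Bool.false_eq_true, if_false]
      cases hw : pvWalkB pm cache (pm.size + 1) fid PySem.Set.empty [] with
      | none =>
        exfalso
        refine pvWalkB_ne_none pm cache (pm.size + 1) fid PySem.Set.empty []
          (h fid hg) rfl ?_ hw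
        have hfil : (pm.keys.filter (fun k => !PySem.Set.contains PySem.Set.empty k)).length
            = pm.keys.length := by
          simp [PySem.Set.contains, PySem.Set.empty]
        rw [hfil]
        simp only [PySem.Dict.keys, List.length_map]
        exact Nat.lt_succ_self _
      | some r =>
        obtain ⟨chain, base⟩ := r
        obtain ⟨t, ht, hd⟩ := pvWalk_depth pm cache (pm.size + 1) fid PySem.Set.empty [] chain
          base hc rfl (by intro x hx; simp [PySem.Set.contains, PySem.Set.empty] at hx) hw
        simp only [List.nil_append] at ht
        subst ht
        rw [show pm.size + 2 = pm.size + 1 + 1 from rfl, hd]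

lemma pvFold_eq (pm : PySem.Dict Int (Option Int)) (l : List (List (String × Int)))
    (h : ∀ f ∈ l, ∀ fid : Int, (PySem.Dict.mk f).get? "id" = some fid → fid ∈ pm.keys) :
    ∀ cache : PySem.Dict Int Int, l.foldl (pvStepA pm) cache = l.foldl (pvStepB pm) cache := by
  induction l with
  | nil => intro cache; rfl
  | cons f fs ih =>
    intro cache
    rw [List.foldl_cons, List.foldl_cons,
      pvStep_eq pm cache f (h f (List.mem_cons_self) ),
      ih (fun g hg => h g (List.mem_cons_of_mem f hg))]

-- ===== VERDICT (by name: the statement is the Claim_ definition above) =====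
theorem folder_depth_map_py_spec : Claim_equal_folder_depth_map_py := by
  intro folders _dom _pre
  unfold Spec_folder_depth_map_py folder_depth_map_py folder_depth_map_py_alt
  show (folders.foldl (pvStepA (pvParentMap folders)) PySem.Dict.empty).items
      = (folders.foldl (pvStepB (pvParentMap folders)) PySem.Dict.empty).items
  rw [pvFold_eq (pvParentMap folders) folders
    (fun f hf fid hg => pvParentMap_mem_keys folders PySem.Dict.empty f hf fid hg)]
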